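-- pv_equiv track=rewrite | github.com/ksmin23/my-adk-python-samples | agent-memory/bigquery-data-agent-with-dynamic-context/bigquery_data_agent/tools.py | _parse_memory_fact
-- ===== SOURCE A (Python) =====
-- from typing import Any, Literal, Optional
--
-- def _parse_memory_fact(fact: str) -> dict[str, Any]:
--   """Parses a structured memory fact string into a dictionary.
--
--   The fact string is expected to have fields like 'Title:', 'Description:',
--   'NL Query:', and 'SQL:'. Multi-line values are supported.
--
--   Args:
--     fact: The raw fact string from memory.
--
--   Returns:
--     A dictionary containing the parsed fields.
--   """
--
--   parsed = {"fact": fact}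
--
--   # Mapping of prefixes to match_entry keys
--   key_map = {
--     "title:": "title",
--     "description:": "description",
--     "nl query:": "nl_query",
--     "sql:": "sql_query",
--   }
--
--   current_key = None
--   for line in fact.split("\n"):
--     line_lower = line.lower()
--     # Check if line starts with any of our known prefixes
--     matched = False
--     for prefix, entry_key in key_map.items():
--       if line_lower.startswith(prefix):
--         current_key = entry_key
--         parsed[current_key] = line.split(":", 1)[1].strip()
--         matched = True
--         break
--
--     if not matched and current_key:
--       # Append multi-line content for the last found key
--       parsed[current_key] += "\n" + line
--
--   return parsed
-- ===== SOURCE B (Python) =====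
-- def _parse_memory_fact(fact: str) -> dict:
--   """Segment-based parse: skip lines before the first header, then cut the
--   text into header-led segments and join each segment's value at once."""
--   key_map = {
--     "title:": "title",
--     "description:": "description",
--     "nl query:": "nl_query",
--     "sql:": "sql_query",
--   }
--
--   def header_key(line):
--     low = line.lower()
--     for prefix, key in key_map.items():
--       if low.startswith(prefix):
--         return key
--     return None
--
--   lines = fact.split("\n")
--   n = len(lines)
--   parsed = {"fact": fact}
--
--   i = 0
--   while i < n and header_key(lines[i]) is None:
--     i += 1
--
--   while i < n:
--     key = header_key(lines[i])
--     head = lines[i].split(":", 1)[1].strip()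
--     j = i + 1
--     while j < n and header_key(lines[j]) is None:
--       j += 1
--     parsed[key] = "\n".join([head] + lines[i + 1 : j])
--     i = j
--
--   return parsed
-- ===== Notes on version B (the rewrite author's own statement) =====
-- stated objective: alternative
-- what changed: Replaces A's running current_key/append state machine over the lines by a segment decomposition: skip lines before the first header, then cut the line list into header-led segments and build each value in one newline-join of the stripped header remainder plus its raw continuation lines.
import Mathlib
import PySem

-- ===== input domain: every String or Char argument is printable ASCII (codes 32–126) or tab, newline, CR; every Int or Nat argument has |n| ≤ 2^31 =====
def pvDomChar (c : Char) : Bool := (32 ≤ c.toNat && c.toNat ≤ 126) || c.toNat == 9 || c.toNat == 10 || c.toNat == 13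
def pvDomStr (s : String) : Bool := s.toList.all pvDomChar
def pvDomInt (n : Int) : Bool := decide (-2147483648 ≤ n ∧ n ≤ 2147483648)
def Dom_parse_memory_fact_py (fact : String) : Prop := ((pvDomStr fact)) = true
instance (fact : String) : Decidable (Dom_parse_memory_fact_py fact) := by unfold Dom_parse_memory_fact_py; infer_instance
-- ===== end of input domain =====

-- B replaces A's running current_key/append state machine by a segment decomposition
-- (skip to the first header, then cut header-led segments and join each value at once);
-- same return value, objective: alternative decomposition (no speed claim).

-- ===== PORT A =====
-- the key_map dict, iterated in insertion order only
def pvKeyMap : List (String × String) :=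
  [("title:", "title"), ("description:", "description"),
   ("nl query:", "nl_query"), ("sql:", "sql_query")]

-- A's inner 'for prefix, entry_key in key_map.items(): if line_lower.startswith(prefix): … break'
def pvFindKeyA : String → List (String × String) → Option String
  | _, [] => none
  | low, (p, k) :: rest => if PySem.Str.startswith low p then some k else pvFindKeyA low rest

-- line.split(":", 1)[1].strip(); the [1] always exists where A evaluates it,
-- since the line starts with a prefix that contains ':'
def pvAfterColonA (line : String) : String :=
  PySem.Str.strip (PySem.List.pyGetD ((PySem.Str.splitMax? line ":" 1).getD []) 1 "")

-- A's main loop: state (parsed, current_key)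
def pvLoopA : List String → PySem.Dict String String → Option String → PySem.Dict String String
  | [], d, _ => d
  | l :: rest, d, ck =>
    match pvFindKeyA (PySem.Str.lower l) pvKeyMap with
    | some k => pvLoopA rest (d.insert k (pvAfterColonA l)) (some k)
    | none =>
      match ck with
      | some k => pvLoopA rest (d.modify k "" (· ++ ("\n" ++ l))) ck
      | none => pvLoopA rest d ck

def parse_memory_fact_py (fact : String) : List (String × String) :=
  (pvLoopA ((PySem.Str.split? fact "\n").getD []) (PySem.Dict.ofList [("fact", fact)]) none).items

-- ===== PORT B =====
-- B's header_key helper (same inner prefix loop as the Python)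
def pvFindKeyB : String → List (String × String) → Option String
  | _, [] => none
  | low, (p, k) :: rest => if PySem.Str.startswith low p then some k else pvFindKeyB low rest

def pvHeaderKeyB (line : String) : Option String :=
  pvFindKeyB (PySem.Str.lower line) pvKeyMap

-- B's outer while loop: lines starts at a header (or is empty); take the segment's
-- continuation lines, join the value once, recurse on the rest
def pvSegB (lines : List String) (d : PySem.Dict String String) : PySem.Dict String String :=
  match lines with
  | [] => d
  | l :: rest =>
    let key := (pvHeaderKeyB l).getD ""   -- header_key(lines[i]), non-None where reached
    let head := PySem.Str.strip (PySem.List.pyGetD ((PySem.Str.splitMax? l ":" 1).getD []) 1 "")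
    let cont := rest.takeWhile (fun x => (pvHeaderKeyB x).isNone)
    let rest' := rest.dropWhile (fun x => (pvHeaderKeyB x).isNone)
    pvSegB rest' (d.insert key (PySem.Str.join "\n" (head :: cont)))
  termination_by lines.length
  decreasing_by
    simp only [List.length_cons]
    exact Nat.lt_succ_of_le (List.length_dropWhile_le _ _)

def parse_memory_fact_py_alt (fact : String) : List (String × String) :=
  let lines := (PySem.Str.split? fact "\n").getD []
  (pvSegB (lines.dropWhile (fun x => (pvHeaderKeyB x).isNone))
          (PySem.Dict.ofList [("fact", fact)])).items

-- ===== PRECONDITION & SPEC =====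
def Spec_parse_memory_fact_py (fact : String) (out : List (String × String)) : Prop := out = parse_memory_fact_py_alt fact
instance (fact : String) (out : List (String × String)) : Decidable (Spec_parse_memory_fact_py fact out) := by unfold Spec_parse_memory_fact_py; infer_instance

-- ===== CLAIM (what is proved, stated in full; the proofs are below) =====
def Claim_equal_parse_memory_fact_py : Prop := ∀ (fact : String), Dom_parse_memory_fact_py fact → Spec_parse_memory_fact_py fact (parse_memory_fact_py fact)

-- ===== LEMMAS AND PROOFS =====

theorem pvFindKeyB_eq_A (low : String) (km : List (String × String)) :
    pvFindKeyB low km = pvFindKeyA low km := by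
  induction km with
  | nil => rfl
  | cons p rest ih => cases p; simp only [pvFindKeyB, pvFindKeyA, ih]

theorem pvModify_insert (d : PySem.Dict String String) (k v : String) (f : String → String) :
    (d.insert k v).modify k "" f = d.insert k (f v) := by
  unfold PySem.Dict.modify
  rw [PySem.Dict.getD_insert_self, PySem.Dict.insert_insert_self]

-- A's loop over a run of continuation lines just folds them onto the value at k
theorem pvLoopA_cont (cont : List String) (rest : List String)
    (d : PySem.Dict String String) (k v : String)
    (h : ∀ x ∈ cont, pvFindKeyA (PySem.Str.lower x) pvKeyMap = none) :
    pvLoopA (cont ++ rest) (d.insert k v) (some k)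
      = pvLoopA rest (d.insert k (cont.foldl (fun s l => s ++ ("\n" ++ l)) v)) (some k) := by
  induction cont generalizing v with
  | nil => rfl
  | cons x cs ih =>
    have hx := h x (by simp)
    simp only [List.cons_append, pvLoopA, hx, pvModify_insert, List.foldl_cons]
    exact ih _ (fun y hy => h y (by simp [hy]))

-- '\n'.join (v :: cont) is A's fold of '\n' + line onto v
theorem pvCharsJoinShift (sep a b : List Char) (rest : List (List Char)) :
    PySem.Chars.join sep ((a ++ sep ++ b) :: rest) = a ++ sep ++ PySem.Chars.join sep (b :: rest) := by
  cases rest with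
  | nil => simp [PySem.Chars.join_singleton]
  | cons c cs => simp [PySem.Chars.join_cons_cons, List.append_assoc]

theorem pvJoin_eq_foldl (cont : List String) (v : String) :
    PySem.Str.join "\n" (v :: cont) = cont.foldl (fun s l => s ++ ("\n" ++ l)) v := by
  induction cont generalizing v with
  | nil =>
    apply String.ext
    simp only [PySem.Str.toList_join, List.map_cons, List.map_nil, List.foldl_nil]
    simp [PySem.Chars.join_singleton, String.toList]
  | cons x cs ih =>
    have step : PySem.Str.join "\n" (v :: x :: cs) = PySem.Str.join "\n" ((v ++ ("\n" ++ x)) :: cs) := by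
      apply String.ext
      simp only [PySem.Str.toList_join, List.map_cons]
      have : (v ++ ("\n" ++ x)).toList = v.toList ++ "\n".toList ++ x.toList := by
        simp [String.toList_append, List.append_assoc]
      rw [this, pvCharsJoinShift]
      cases cs with
      | nil => simp [PySem.Chars.join_singleton, PySem.Chars.join_cons_cons]
      | cons c cs' => simp [PySem.Chars.join_cons_cons, List.append_assoc]
    rw [step, ih, List.foldl_cons]

def pvHeadOk (lines : List String) : Prop :=
  ∀ x ∈ lines.head?, (pvFindKeyA (PySem.Str.lower x) pvKeyMap).isSome

theorem pvHeadOk_dropWhile (lines : List String) :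
    pvHeadOk (lines.dropWhile (fun x => (pvHeaderKeyB x).isNone)) := by
  induction lines with
  | nil => intro x hx; simp at hx
  | cons l rest ih =>
    by_cases hp : (pvHeaderKeyB l).isNone
    · simpa [List.dropWhile_cons, hp] using ih
    · intro x hx
      simp [hp] at hx
      subst hx
      have : (pvHeaderKeyB l).isSome := by
        cases h : pvHeaderKeyB l with
        | none => simp [h] at hp
        | some k => simp
      simpa [pvHeaderKeyB, pvFindKeyB_eq_A] using this

-- main segment lemma: from a header (or the end), A's loop equals B's segment loop,
-- whatever current_key is
theorem pvLoopA_eq_segB (n : Nat) :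
    ∀ (lines : List String), lines.length ≤ n → pvHeadOk lines →
    ∀ (d : PySem.Dict String String) (ck : Option String),
      pvLoopA lines d ck = pvSegB lines d := by
  induction n with
  | zero =>
    intro lines hn _ d ck
    have : lines = [] := List.eq_nil_of_length_eq_zero (Nat.le_zero.mp hn)
    subst this; rw [pvSegB]; rfl
  | succ m ih =>
    intro lines hn hok d ck
    cases lines with
    | nil => rw [pvSegB]; rfl
    | cons l rest =>
      have hsome := hok l (by simp)
      obtain ⟨k, hk⟩ := Option.isSome_iff_exists.mp hsome
      have hkey : (pvHeaderKeyB l).getD "" = k := by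
        simp [pvHeaderKeyB, pvFindKeyB_eq_A, hk]
      have hsplit := List.takeWhile_append_dropWhile
        (p := fun x => (pvHeaderKeyB x).isNone) (l := rest)
      have hcont : ∀ x ∈ rest.takeWhile (fun x => (pvHeaderKeyB x).isNone),
          pvFindKeyA (PySem.Str.lower x) pvKeyMap = none := by
        intro x hx
        have := List.mem_takeWhile_imp hx
        simpa [pvHeaderKeyB, pvFindKeyB_eq_A, Option.isNone_iff_eq_none] using this
      have hlen : (rest.dropWhile (fun x => (pvHeaderKeyB x).isNone)).length ≤ m := by
        have h1 := List.length_dropWhile_le (fun x => (pvHeaderKeyB x).isNone) rest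
        have h2 : rest.length ≤ m := by simpa using Nat.le_of_succ_le_succ hn
        omega
      calc pvLoopA (l :: rest) d ck
          = pvLoopA rest (d.insert k (pvAfterColonA l)) (some k) := by
            simp only [pvLoopA, hk]
        _ = pvLoopA (rest.takeWhile (fun x => (pvHeaderKeyB x).isNone)
              ++ rest.dropWhile (fun x => (pvHeaderKeyB x).isNone))
              (d.insert k (pvAfterColonA l)) (some k) := by rw [hsplit]
        _ = pvLoopA (rest.dropWhile (fun x => (pvHeaderKeyB x).isNone))
              (d.insert k ((rest.takeWhile (fun x => (pvHeaderKeyB x).isNone)).foldl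
                (fun s l => s ++ ("\n" ++ l)) (pvAfterColonA l))) (some k) :=
            pvLoopA_cont _ _ _ _ _ hcont
        _ = pvSegB (rest.dropWhile (fun x => (pvHeaderKeyB x).isNone))
              (d.insert k ((rest.takeWhile (fun x => (pvHeaderKeyB x).isNone)).foldl
                (fun s l => s ++ ("\n" ++ l)) (pvAfterColonA l))) :=
            ih _ hlen (pvHeadOk_dropWhile rest) _ _
        _ = pvSegB (l :: rest) d := by
            rw [pvSegB]
            simp only [hkey, pvAfterColonA, pvJoin_eq_foldl]

theorem pvLoopA_skip (lines : List String) (d : PySem.Dict String String) :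
    pvLoopA lines d none = pvSegB (lines.dropWhile (fun x => (pvHeaderKeyB x).isNone)) d := by
  induction lines generalizing d with
  | nil => rw [List.dropWhile_nil, pvSegB]; rfl
  | cons l rest ih =>
    cases hk : pvFindKeyA (PySem.Str.lower l) pvKeyMap with
    | none =>
      have hp : (pvHeaderKeyB l).isNone = true := by
        simp [pvHeaderKeyB, pvFindKeyB_eq_A, hk]
      simp only [pvLoopA, hk, List.dropWhile_cons, hp, if_pos]
      exact ih d
    | some k =>
      have hp : (pvHeaderKeyB l).isNone = false := by
        simp [pvHeaderKeyB, pvFindKeyB_eq_A, hk]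
      have hok : pvHeadOk (l :: rest) := by
        intro x hx; simp at hx; subst hx; simp [hk]
      rw [List.dropWhile_cons, hp]
      simpa using pvLoopA_eq_segB (l :: rest).length (l :: rest) le_rfl hok d none

-- ===== VERDICT (by name: the statement is the Claim_ definition above) =====
theorem parse_memory_fact_py_spec : Claim_equal_parse_memory_fact_py := by
  intro fact _
  unfold Spec_parse_memory_fact_py parse_memory_fact_py parse_memory_fact_py_alt
  exact congrArg PySem.Dict.items (pvLoopA_skip _ _)
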